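-- pv_equiv track=rewrite | github.com/catalyst-team/catalyst | catalyst/loggers/neptune.py | _prepare_metrics
-- ===== SOURCE A (Python) =====
-- def _prepare_metrics(metrics):
--     conflict_keys = []
--     processed_metrics = dict(metrics)
--     for k in list(processed_metrics.keys()):
--         if k.endswith("/std"):
--             k_stripped = k[:-4]
--             k_val = k_stripped + "/val"
--             if k_val not in processed_metrics.keys():
--                 processed_metrics[k_val] = processed_metrics.pop(k_stripped)
--     for k in processed_metrics.keys():
--         for j in processed_metrics.keys():
--             if j.startswith(k) and j != k and k not in conflict_keys:
--                 conflict_keys.append(k)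
--     for i in conflict_keys:
--         processed_metrics[i + "_val"] = processed_metrics.pop(i)
--     return processed_metrics
-- ===== SOURCE B (Python) =====
-- def _prepare_metrics(metrics):
--     processed = dict(metrics)
--     # rename: precompute the bases to move from the initial key set (one pass)
--     moves = [k[:-4] for k in processed
--              if k.endswith("/std") and k[:-4] + "/val" not in processed]
--     for base in moves:
--         processed[base + "/val"] = processed.pop(base)
--     # a key conflicts iff some other key extends it: in sorted order all
--     # extensions of k sort directly after k, so check the adjacent neighbour
--     ks = sorted(processed)
--     conflicts = {ks[i] for i in range(len(ks) - 1) if ks[i + 1].startswith(ks[i])}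
--     for k in [k for k in processed if k in conflicts]:
--         processed[k + "_val"] = processed.pop(k)
--     return processed
-- ===== Notes on version B (the rewrite author's own statement) =====
-- stated objective: faster
-- what changed: B precomputes the '/std' renames as one pass over the initial key set instead of A's in-place loop with dynamic membership tests, and replaces A's all-pairs prefix scan by sorting the keys and testing each key only against its sorted successor (all extensions of a key sort directly after it), collecting conflicts in dict order.
-- outside the precondition, e.g. on _prepare_metrics({'a/std': 1}): A raises KeyError, B raises KeyError
import Mathlib
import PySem

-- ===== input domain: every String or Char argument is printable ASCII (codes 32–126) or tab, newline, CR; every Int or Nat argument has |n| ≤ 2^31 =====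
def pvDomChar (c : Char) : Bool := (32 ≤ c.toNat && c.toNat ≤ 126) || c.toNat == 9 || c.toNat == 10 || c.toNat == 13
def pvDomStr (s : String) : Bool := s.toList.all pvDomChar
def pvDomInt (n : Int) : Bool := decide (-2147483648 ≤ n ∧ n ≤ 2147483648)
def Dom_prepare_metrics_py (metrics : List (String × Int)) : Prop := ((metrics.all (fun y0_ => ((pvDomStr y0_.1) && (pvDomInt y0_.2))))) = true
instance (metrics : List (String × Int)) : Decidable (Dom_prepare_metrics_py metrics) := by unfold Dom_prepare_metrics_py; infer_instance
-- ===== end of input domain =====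

-- B replaces A's quadratic all-pairs prefix scan by sort + adjacent-neighbour test (objective: faster);
-- equivalence is about the RETURN value (the Python functions build a fresh dict, the argument is not mutated).

-- ===== PORT A =====
-- shared loop bodies (each is one statement of the Python, kept as a named helper)

-- processed_metrics[k_val] = processed_metrics.pop(k_stripped)  /  processed[base + "/val"] = processed.pop(base)
def pvMoveVal (pm : PySem.Dict String Int) (b : String) : PySem.Dict String Int :=
  match pm.pop? b with            -- Python's pop raises KeyError when b is absent; Pre_ excludes those inputs
  | some (v, pm') => pm'.insert (b ++ "/val") v
  | none => pm

-- processed_metrics[i + "_val"] = processed_metrics.pop(i)  (phase 3, textually identical in A and B)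
def pvRename (pm : PySem.Dict String Int) (i : String) : PySem.Dict String Int :=
  match pm.pop? i with
  | some (v, pm') => pm'.insert (i ++ "_val") v
  | none => pm                    -- unreachable: conflict keys are keys of pm

-- body of A's first loop
def pvStepStd (pm : PySem.Dict String Int) (k : String) : PySem.Dict String Int :=
  if PySem.Str.endswith k "/std" then
    let kStripped := PySem.Str.slice k none (some (-4))
    if pm.contains (kStripped ++ "/val") then pm
    else pvMoveVal pm kStripped
  else pm

def prepare_metrics_py (metrics : List (String × Int)) : List (String × Int) :=
  let pm0 := PySem.Dict.ofList metrics
  let pm1 := pm0.keys.foldl pvStepStd pm0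
  let conflictKeys := pm1.keys.foldl (fun ck k =>
    pm1.keys.foldl (fun ck j =>
      if PySem.Str.startswith j k && j != k && !(ck.contains k) then ck ++ [k] else ck) ck) []
  let pm2 := conflictKeys.foldl pvRename pm1
  pm2.items

-- ===== PORT B =====
def prepare_metrics_py_alt (metrics : List (String × Int)) : List (String × Int) :=
  let pm0 := PySem.Dict.ofList metrics
  let moves := (pm0.keys.filter (fun k =>
      PySem.Str.endswith k "/std" &&
        !(pm0.contains (PySem.Str.slice k none (some (-4)) ++ "/val")))).map
    (fun k => PySem.Str.slice k none (some (-4)))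
  let pm1 := moves.foldl pvMoveVal pm0
  let ks := PySem.List.sorted pm1.keys (fun x => x) false
  let conflicts : PySem.Set String := PySem.Set.ofList
    ((PySem.List.pyRange 0 ((ks.length : Int) - 1) 1).filterMap (fun i =>
      if PySem.Str.startswith (PySem.List.pyGetD ks (i + 1) "") (PySem.List.pyGetD ks i "")
      then some (PySem.List.pyGetD ks i "") else none))
  let picked := pm1.keys.filter (fun k => PySem.Set.contains conflicts k)
  let pm2 := picked.foldl pvRename pm1
  pm2.items

-- ===== PRECONDITION & SPEC =====
-- Pre_ excludes inputs where some "/std" key has neither its base key nor base+"/val" present (there A's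
-- dict.pop raises KeyError — B raises too), and the degenerate inputs containing a key ending "/val/std",
-- on which A's membership tests read a dict mutated earlier in the same loop (an accident of in-place
-- mutation order that can also make A raise).
def Pre_prepare_metrics_py (metrics : List (String × Int)) : Prop :=
  (∀ k ∈ metrics.map (·.1), PySem.Str.endswith k "/std" = true →
      (PySem.Str.slice k none (some (-4))) ∈ metrics.map (·.1) ∨
      (PySem.Str.slice k none (some (-4)) ++ "/val") ∈ metrics.map (·.1)) ∧
  (∀ k ∈ metrics.map (·.1), PySem.Str.endswith k "/val/std" = false)
instance (metrics : List (String × Int)) : Decidable (Pre_prepare_metrics_py metrics) := by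
  unfold Pre_prepare_metrics_py; infer_instance

def pvWitness_prepare_metrics_py : (List (String × Int)) := [("loss/std", 1), ("loss", 2), ("acc", 3)]

def Spec_prepare_metrics_py (metrics : List (String × Int)) (out : List (String × Int)) : Prop := out = prepare_metrics_py_alt metrics
instance (metrics : List (String × Int)) (out : List (String × Int)) : Decidable (Spec_prepare_metrics_py metrics out) := by unfold Spec_prepare_metrics_py; infer_instance

-- ===== CLAIM (what is proved, stated in full; the proofs are below) =====
def Claim_equal_prepare_metrics_py : Prop := ∀ (metrics : List (String × Int)), Dom_prepare_metrics_py metrics → Pre_prepare_metrics_py metrics → Spec_prepare_metrics_py metrics (prepare_metrics_py metrics)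


-- ===== LEMMAS AND PROOFS =====

-- abbreviations for k[:-4] and k[:-4] + "/val" (proof-side only)
def pvB (k : String) : String := PySem.Str.slice k none (some (-4))
def pvV (k : String) : String := pvB k ++ "/val"

theorem pvB_spec (k : String) (h : PySem.Str.endswith k "/std" = true) :
    k.toList = (pvB k).toList ++ ['/', 's', 't', 'd'] := by
  rw [PySem.Str.endswith_eq, PySem.Chars.endswith_iff] at h
  obtain ⟨t, ht⟩ := h
  have hlen : k.toList.length = t.length + 4 := by rw [← ht]; simp
  have hB : (pvB k).toList = t := by
    show (PySem.Str.slice k none (some (-4))).toList = t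
    rw [PySem.Str.toList_slice, PySem.Chars.slice_eq_listSlice]
    simp only [PySem.List.slice, PySem.List.clampIdx]
    rw [← ht]; simp
  rw [hB, ← ht]; rfl

theorem pvB_inj {k k' : String} (h : PySem.Str.endswith k "/std" = true)
    (h' : PySem.Str.endswith k' "/std" = true) (he : pvB k = pvB k') : k = k' := by
  apply String.toList_inj.mp
  rw [pvB_spec k h, pvB_spec k' h', he]

theorem pvV_inj {k k' : String} (h : PySem.Str.endswith k "/std" = true)
    (h' : PySem.Str.endswith k' "/std" = true) (he : pvV k = pvV k') : k = k' := by
  apply pvB_inj h h'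
  apply String.toList_inj.mp
  have := congrArg String.toList he
  simpa [pvV] using this

theorem pvB_val_suffix {k : String} (h : PySem.Str.endswith k "/std" = true)
    (h2 : PySem.Str.endswith (pvB k) "/val" = true) : PySem.Str.endswith k "/val/std" = true := by
  rw [PySem.Str.endswith_eq, PySem.Chars.endswith_iff] at h2 ⊢
  obtain ⟨u, hu⟩ := h2
  refine ⟨u, ?_⟩
  rw [pvB_spec k h, ← hu]
  simp

-- a proper prefix is lexicographically smaller
theorem pv_prefix_lt {l m : List Char} (h : l <+: m) (hne : l ≠ m) : l < m := by
  obtain ⟨t, ht⟩ := h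
  subst ht
  induction l with
  | nil =>
    cases t with
    | nil => simp at hne
    | cons a t => exact List.Lex.nil
  | cons c l ih =>
    exact List.Lex.cons (ih (by intro hh; apply hne; simpa using hh))

-- anything strictly between a string and one of its extensions also extends it
theorem pv_between_prefix : ∀ (l s j : List Char), l < s → s < j → l <+: j → l <+: s := by
  intro l
  induction l with
  | nil => intro s j _ _ _; exact List.nil_prefix
  | cons c l ih =>
    intro s j h1 h2 h3
    cases s with
    | nil => exact absurd h1 (by exact List.not_lt_nil _)
    | cons d s =>
      cases j with
      | nil => simp at h3
      | cons e j =>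
        rw [List.cons_prefix_cons] at h3
        obtain ⟨hce, hlj⟩ := h3
        subst hce
        rw [List.cons_lt_cons_iff] at h1 h2
        rcases h1 with hcd | ⟨rfl, hls⟩
        · rcases h2 with hde | ⟨rfl, hsj⟩
          · exact absurd (lt_trans hcd hde) (lt_irrefl _)
          · exact absurd hcd (lt_irrefl _)
        · rcases h2 with hde | ⟨-, hsj⟩
          · exact absurd hde (lt_irrefl _)
          · exact List.cons_prefix_cons.mpr ⟨rfl, ih s j hls hsj hlj⟩

theorem pv_contains_erase (d : PySem.Dict String Int) (b x : String) :
    (d.erase b).contains x = if x = b then false else d.contains x := by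
  obtain ⟨l⟩ := d
  show (l.filter (fun p => !p.1 == b)).any (fun p => p.1 == x) = _
  induction l with
  | nil => simp
  | cons p l ih =>
    by_cases hp : p.1 = b
    · by_cases hx : x = b
      · subst hx; simp [hp, ih]
      · simp [hp, List.any_cons, ih, hx]
        intro h; exact absurd h.symm hx
    · simp [hp, List.any_cons, ih]
      by_cases hx : x = b
      · subst hx; simp [hp]
      · simp [hx]

theorem pv_nodup_keys_erase (d : PySem.Dict String Int) (b : String) (h : d.keys.Nodup) :
    (d.erase b).keys.Nodup := by
  obtain ⟨l⟩ := d
  show ((l.filter (fun p => !p.1 == b)).map (·.1)).Nodup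
  exact ((List.filter_sublist (l := l)).map _).nodup h

theorem pv_keys_ofList (m : List (String × Int)) :
    (PySem.Dict.ofList m).keys = PySem.Set.ofList (m.map (·.1)) := by
  show (List.foldl (fun acc p => acc.insert p.1 p.2) PySem.Dict.empty m).keys = _
  rw [PySem.Dict.keys_foldl_insert_key (key := Prod.fst) (f := fun d x => x.2)]
  rw [PySem.Dict.keys_empty, PySem.Set.update_nil_left]

-- the static per-key predicate of B's comprehension
def pvP (d0 : PySem.Dict String Int) (k : String) : Bool :=
  PySem.Str.endswith k "/std" && !(d0.contains (PySem.Str.slice k none (some (-4)) ++ "/val"))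

theorem pv_phase1 (d0 : PySem.Dict String Int)
    (pre2 : ∀ k ∈ d0.keys, PySem.Str.endswith k "/val/std" = false) :
    ∀ (q : List String) (d : PySem.Dict String Int), q.Nodup → (∀ k ∈ q, k ∈ d0.keys) →
      (∀ k ∈ q, PySem.Str.endswith k "/std" = true →
          d.contains (pvV k) = d0.contains (pvV k)) →
      q.foldl pvStepStd d = q.foldl (fun pm k => if pvP d0 k then pvMoveVal pm (pvB k) else pm) d := by
  intro q
  induction q with
  | nil => intro d _ _ _; rfl
  | cons k0 q ih =>
    intro d hnd hmem hinv
    have hk0K : k0 ∈ d0.keys := hmem k0 (by simp)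
    have hstep : pvStepStd d k0 = if pvP d0 k0 then pvMoveVal d (pvB k0) else d := by
      unfold pvStepStd pvP
      by_cases hend : PySem.Str.endswith k0 "/std" = true
      · have hc := hinv k0 (by simp) hend
        simp only [pvV, pvB] at hc
        simp only [hend, if_true, Bool.true_and, hc, pvB]
        by_cases hc0 : d0.contains (PySem.Str.slice k0 none (some (-4)) ++ "/val") = true
        · simp [hc0]
        · simp [eq_false_of_ne_true hc0]
      · rw [PySem.Str.endswith_eq] at hend
        simp at hend
        simp [hend]
    rw [List.foldl_cons, List.foldl_cons, hstep]
    apply ih _ (List.Nodup.of_cons hnd) (fun k hk => hmem k (List.mem_cons_of_mem _ hk))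
    intro k hk hkend
    have hkK : k ∈ d0.keys := hmem k (List.mem_cons_of_mem _ hk)
    have hkne : k ≠ k0 := fun h => (List.nodup_cons.mp hnd).1 (h ▸ hk)
    by_cases hP : pvP d0 k0 = true
    · simp only [hP, if_true]
      have hk0end : PySem.Str.endswith k0 "/std" = true :=
        Bool.and_elim_left (by unfold pvP at hP; exact hP)
      unfold pvMoveVal
      cases hg : d.get? (pvB k0) with
      | none =>
        have hpop : d.pop? (pvB k0) = none := by simp [PySem.Dict.pop?, hg]
        rw [hpop]
        exact hinv k (List.mem_cons_of_mem _ hk) hkend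
      | some v =>
        have hpop : d.pop? (pvB k0) = some (v, d.erase (pvB k0)) := by simp [PySem.Dict.pop?, hg]
        rw [hpop]
        have hVne : pvV k ≠ pvV k0 := fun h => hkne (pvV_inj hkend hk0end h)
        have hBne : pvV k ≠ pvB k0 := by
          intro h
          have hsuf : PySem.Str.endswith (pvB k0) "/val" = true := by
            rw [PySem.Str.endswith_eq, PySem.Chars.endswith_iff]
            exact ⟨(pvB k).toList, by rw [← h]; simp [pvV]⟩
          have := pre2 k0 hk0K
          rw [pvB_val_suffix hk0end hsuf] at this
          exact absurd this (by simp)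
        show ((d.erase (pvB k0)).insert (pvB k0 ++ "/val") v).contains (pvV k) = _
        rw [PySem.Dict.contains_insert, pv_contains_erase]
        have hbeq : (pvV k == pvB k0 ++ "/val") = false := beq_eq_false_iff_ne.mpr hVne
        rw [hbeq, if_neg hBne]
        simpa using hinv k (List.mem_cons_of_mem _ hk) hkend
    · simp only [eq_false_of_ne_true hP]
      exact hinv k (List.mem_cons_of_mem _ hk) hkend

theorem pv_nodup_step (d : PySem.Dict String Int) (k : String) (h : d.keys.Nodup) :
    (pvStepStd d k).keys.Nodup := by
  unfold pvStepStd
  by_cases he : PySem.Str.endswith k "/std" = true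
  · rw [if_pos he]
    show (if d.contains (PySem.Str.slice k none (some (-4)) ++ "/val") = true then d
      else pvMoveVal d (PySem.Str.slice k none (some (-4)))).keys.Nodup
    by_cases hc : d.contains (PySem.Str.slice k none (some (-4)) ++ "/val") = true
    · rw [if_pos hc]; exact h
    · rw [if_neg hc]
      unfold pvMoveVal
      cases hg : d.get? (PySem.Str.slice k none (some (-4))) with
      | none => rw [show d.pop? _ = none by simp [PySem.Dict.pop?, hg]]; exact h
      | some v =>
        rw [show d.pop? (PySem.Str.slice k none (some (-4))) =
              some (v, d.erase (PySem.Str.slice k none (some (-4)))) by simp [PySem.Dict.pop?, hg]]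
        exact PySem.Dict.nodup_keys_insert _ _ _ (pv_nodup_keys_erase _ _ h)
  · rw [if_neg he]; exact h

theorem pv_nodup_phase1 : ∀ (q : List String) (d : PySem.Dict String Int), d.keys.Nodup →
    (q.foldl pvStepStd d).keys.Nodup := by
  intro q
  induction q with
  | nil => intro d h; exact h
  | cons k q ih => intro d h; exact ih _ (pv_nodup_step d k h)

-- A's inner conflict loop: a no-op once k is already collected
theorem pv_inner_mem (k : String) : ∀ (js : List String) (ck : List String), k ∈ ck →
    js.foldl (fun ck j => if PySem.Str.startswith j k && j != k && !(ck.contains k) then ck ++ [k] else ck) ck = ck := by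
  intro js
  induction js with
  | nil => intro ck _; rfl
  | cons j js ih =>
    intro ck hk
    rw [List.foldl_cons, if_neg ?_]
    · exact ih ck hk
    · simp
      exact fun _ _ => hk

-- A's inner conflict loop appends k exactly when some j extends k
theorem pv_inner (k : String) : ∀ (js : List String) (ck : List String), k ∉ ck →
    js.foldl (fun ck j => if PySem.Str.startswith j k && j != k && !(ck.contains k) then ck ++ [k] else ck) ck =
      if js.any (fun j => PySem.Str.startswith j k && j != k) then ck ++ [k] else ck := by
  intro js
  induction js with
  | nil => intro ck _; rfl
  | cons j js ih =>
    intro ck hk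
    have hnc : (ck.contains k) = false := by
      rw [← Bool.not_eq_true, List.contains_iff_mem]; exact hk
    by_cases hj : (PySem.Str.startswith j k && j != k) = true
    · simp only [List.foldl_cons, List.any_cons, hj, hnc, Bool.not_false, Bool.and_true, if_true,
        Bool.true_or]
      exact pv_inner_mem k js (ck ++ [k]) (by simp)
    · simp only [List.foldl_cons, List.any_cons, eq_false_of_ne_true hj, hnc, Bool.false_and,
        Bool.false_or]
      exact ih ck hk

-- A's outer conflict loop is a filter
theorem pv_outer (keysl : List String) : ∀ (q : List String) (acc : List String), q.Nodup →
    (∀ k ∈ q, k ∉ acc) →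
    q.foldl (fun ck k => keysl.foldl (fun ck j =>
        if PySem.Str.startswith j k && j != k && !(ck.contains k) then ck ++ [k] else ck) ck) acc =
      acc ++ q.filter (fun k => keysl.any (fun j => PySem.Str.startswith j k && j != k)) := by
  intro q
  induction q with
  | nil => intro acc _ _; simp
  | cons k0 q ih =>
    intro acc hnd hacc
    rw [List.foldl_cons, pv_inner k0 keysl acc (hacc k0 (by simp))]
    by_cases hany : (keysl.any (fun j => PySem.Str.startswith j k0 && j != k0)) = true
    · rw [if_pos hany]
      rw [ih (acc ++ [k0]) (List.Nodup.of_cons hnd) ?fresh]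
      · rw [List.filter_cons, if_pos hany]
        simp
      case fresh =>
        intro k hk
        simp only [List.mem_append, List.mem_singleton]
        rintro (h | rfl)
        · exact hacc k (List.mem_cons_of_mem _ hk) h
        · exact (List.nodup_cons.mp hnd).1 hk
    · rw [if_neg (by simpa using hany)]
      rw [ih acc (List.Nodup.of_cons hnd) (fun k hk => hacc k (List.mem_cons_of_mem _ hk))]
      rw [List.filter_cons, if_neg hany]

-- B's adjacent-neighbour list, named for the proofs
def pvConfList (ks : List String) : List String :=
  (PySem.List.pyRange 0 ((ks.length : Int) - 1) 1).filterMap (fun i =>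
    if PySem.Str.startswith (PySem.List.pyGetD ks (i + 1) "") (PySem.List.pyGetD ks i "")
    then some (PySem.List.pyGetD ks i "") else none)

theorem pv_mem_confList (ks : List String) (hpw : ks.Pairwise (· < ·)) (x : String) :
    x ∈ pvConfList ks ↔ x ∈ ks ∧ ∃ j ∈ ks, j ≠ x ∧ PySem.Str.startswith j x = true := by
  unfold pvConfList
  rw [List.mem_filterMap]
  constructor
  · rintro ⟨i, hi, hsome⟩
    rw [PySem.List.mem_pyRange_one] at hi
    obtain ⟨hi0, hi1⟩ := hi
    have hn1 : i.toNat + 1 < ks.length := by omega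
    have hn0 : i.toNat < ks.length := by omega
    rw [PySem.List.pyGetD_eq_getElem ks "" hi0 (by omega),
        PySem.List.pyGetD_eq_getElem ks "" (by omega : (0:Int) ≤ i + 1) (by omega)] at hsome
    have hcast : (i + 1).toNat = i.toNat + 1 := by omega
    split at hsome
    · rename_i hcond
      rw [Option.some_inj] at hsome
      subst hsome
      refine ⟨List.getElem_mem hn0, ks[(i+1).toNat], List.getElem_mem (by omega), ?_, ?_⟩
      · have hlt : ks[i.toNat] < ks[(i+1).toNat] :=
          List.pairwise_iff_getElem.mp hpw _ _ hn0 (by omega) (by omega)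
        exact ne_of_gt hlt
      · exact hcond
    · simp at hsome
  · rintro ⟨hx, j, hj, hjne, hpre⟩
    obtain ⟨n, hn, hxn⟩ := List.mem_iff_getElem.mp hx
    obtain ⟨m, hm, hjm⟩ := List.mem_iff_getElem.mp hj
    have hxj : x.toList <+: j.toList := by
      rw [PySem.Str.startswith_eq, PySem.Chars.startswith_iff] at hpre
      exact hpre
    have hlt : x < j :=
      String.lt_iff_toList_lt.mpr
        (pv_prefix_lt hxj (fun h => hjne (String.toList_inj.mp h).symm))
    have hnm : n < m := by
      rcases lt_trichotomy n m with h | h | h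
      · exact h
      · subst h
        rw [hxn] at hjm
        exact absurd hjm.symm hjne
      · have := List.pairwise_iff_getElem.mp hpw _ _ hm hn h
        rw [hxn, hjm] at this
        exact absurd (lt_trans this hlt) (lt_irrefl _)
    have hn1 : n + 1 < ks.length := by omega
    have hxs : x < ks[n + 1] := by
      have := List.pairwise_iff_getElem.mp hpw n (n + 1) hn hn1 (by omega)
      rwa [hxn] at this
    have hps : x.toList <+: ks[n + 1].toList := by
      rcases eq_or_lt_of_le (by omega : n + 1 ≤ m) with h | h
      · subst h
        rw [hjm]
        exact hxj
      · have hsj : ks[n + 1] < j := by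
          have := List.pairwise_iff_getElem.mp hpw (n + 1) m hn1 hm h
          rwa [hjm] at this
        exact pv_between_prefix _ _ _ (String.lt_iff_toList_lt.mp hxs)
          (String.lt_iff_toList_lt.mp hsj) hxj
    refine ⟨(n : Int), ?_, ?_⟩
    · rw [PySem.List.mem_pyRange_one]
      omega
    · rw [PySem.List.pyGetD_eq_getElem ks "" (by omega) (by exact_mod_cast by omega : (n : Int) < ks.length),
          PySem.List.pyGetD_eq_getElem ks "" (by omega) (by omega)]
      have h1 : ((n : Int)).toNat = n := by omega
      have h2 : ((n : Int) + 1).toNat = n + 1 := by omega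
      rw [if_pos ?_]
      · rw [Option.some_inj]
        simp only [h1]
        exact hxn
      · simp only [h1, h2]
        rw [PySem.Str.startswith_eq, PySem.Chars.startswith_iff]
        rw [hxn]
        exact hps

theorem pv_sorted_lt (keys : List String) (hnd : keys.Nodup) :
    (PySem.List.sorted keys (fun x => x) false).Pairwise (· < ·) := by
  have hle : (PySem.List.sorted keys (fun x => x) false).Pairwise (· ≤ ·) :=
    PySem.List.sorted_pairwise keys (fun x => x)
  have hnd' : (PySem.List.sorted keys (fun x => x) false).Nodup :=
    (PySem.List.sorted_perm keys (fun x => x) false).symm.nodup hnd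
  exact List.sortedLT_iff_pairwise.mp
    (List.SortedLE.sortedLT_of_nodup (List.sortedLE_iff_pairwise.mpr hle) hnd')

-- ===== VERDICT (by name: the statement is the Claim_ definition above) =====
-- the per-key Bool: "some other key extends k" equals "k is in B's conflicts set"
theorem pv_pred_eq (keys : List String) (hnd : keys.Nodup) (k : String) (hk : k ∈ keys) :
    (keys.any fun j => PySem.Str.startswith j k && j != k) =
      PySem.Set.contains (PySem.Set.ofList (pvConfList (PySem.List.sorted keys (fun x => x) false))) k := by
  rw [Bool.eq_iff_iff, List.any_eq_true]
  have hpw := pv_sorted_lt keys hnd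
  have hmem : ∀ x, x ∈ PySem.List.sorted keys (fun x => x) false ↔ x ∈ keys :=
    fun x => PySem.List.mem_sorted keys (fun x => x) false x
  constructor
  · rintro ⟨j, hj, hcond⟩
    rw [Bool.and_eq_true] at hcond
    have : k ∈ pvConfList (PySem.List.sorted keys (fun x => x) false) := by
      rw [pv_mem_confList _ hpw]
      exact ⟨(hmem k).mpr hk, j, (hmem j).mpr hj, bne_iff_ne.mp hcond.2, hcond.1⟩
    show List.contains _ k = true
    rw [List.contains_iff_mem, PySem.Set.mem_ofList]
    exact this
  · intro hc
    have : k ∈ pvConfList (PySem.List.sorted keys (fun x => x) false) := by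
      rw [← PySem.Set.mem_ofList, ← List.contains_iff_mem]
      exact hc
    rw [pv_mem_confList _ hpw] at this
    obtain ⟨-, j, hj, hjne, hpre⟩ := this
    exact ⟨j, (hmem j).mp hj, by rw [Bool.and_eq_true]; exact ⟨hpre, bne_iff_ne.mpr hjne⟩⟩

theorem prepare_metrics_py_spec : Claim_equal_prepare_metrics_py := by
  intro metrics _hdom hpre
  unfold Spec_prepare_metrics_py
  obtain ⟨hpre1, hpre2⟩ := hpre
  show prepare_metrics_py metrics = prepare_metrics_py_alt metrics
  unfold prepare_metrics_py prepare_metrics_py_alt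
  dsimp only
  have hkeys : ∀ x, x ∈ (PySem.Dict.ofList metrics).keys ↔ x ∈ metrics.map (·.1) := by
    intro x; rw [pv_keys_ofList, PySem.Set.mem_ofList]
  have hnd0 : (PySem.Dict.ofList metrics).keys.Nodup := PySem.Dict.nodup_keys_ofList metrics
  have hpre2' : ∀ k ∈ (PySem.Dict.ofList metrics).keys, PySem.Str.endswith k "/val/std" = false :=
    fun k hk => hpre2 k ((hkeys k).mp hk)
  -- phase 1: A's in-place loop equals B's precomputed move list
  have hph1 : (PySem.Dict.ofList metrics).keys.foldl pvStepStd (PySem.Dict.ofList metrics) =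
      (((PySem.Dict.ofList metrics).keys.filter (fun k =>
          PySem.Str.endswith k "/std" &&
            !((PySem.Dict.ofList metrics).contains (PySem.Str.slice k none (some (-4)) ++ "/val")))).map
        (fun k => PySem.Str.slice k none (some (-4)))).foldl pvMoveVal (PySem.Dict.ofList metrics) := by
    rw [List.foldl_map, List.foldl_filter]
    exact pv_phase1 (PySem.Dict.ofList metrics) hpre2' (PySem.Dict.ofList metrics).keys
      (PySem.Dict.ofList metrics) hnd0 (fun k hk => hk) (fun k _ _ => rfl)
  rw [← hph1]
  -- phase 2: A's nested scan equals B's sorted-adjacency filter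
  have hnd1 : ((PySem.Dict.ofList metrics).keys.foldl pvStepStd (PySem.Dict.ofList metrics)).keys.Nodup :=
    pv_nodup_phase1 _ _ hnd0
  have hconf := pv_outer ((PySem.Dict.ofList metrics).keys.foldl pvStepStd (PySem.Dict.ofList metrics)).keys
    ((PySem.Dict.ofList metrics).keys.foldl pvStepStd (PySem.Dict.ofList metrics)).keys [] hnd1 (by simp)
  rw [List.nil_append] at hconf
  rw [hconf, List.filter_congr (fun k hk => pv_pred_eq _ hnd1 k hk)]
  rfl
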